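-- pv_equiv track=rewrite | github.com/eloyhz/competitive-programming | cpbook/3_problem_solving_paradigms/679_dropping_balls.py | drop_ball
-- ===== SOURCE A (Python) =====
-- def drop_ball(depth, ith_ball):
-- 	result = 1
-- 	for _ in range(depth - 1):
-- 		if ith_ball % 2 == 0:	# even
-- 			ith_ball //= 2
-- 			result = result * 2 + 1
-- 		else:
-- 			ith_ball = (ith_ball + 1) // 2
-- 			result *= 2
-- 	return result
-- ===== SOURCE B (Python) =====
-- def drop_ball(depth, ith_ball):
--     # Closed form: the final leaf is 2**(depth-1) plus the bit-reversal of the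
--     # low depth-1 bits of ith_ball - 1; the reversal is computed by divide and conquer.
--     d = depth - 1
--     if d <= 0:
--         return 1
--     n = (ith_ball - 1) % (1 << d)
--     return (1 << d) + _rev(n, d)
--
-- def _rev(n, d):
--     # reverse the d low bits of n (0 <= n < 2**d), splitting the bit-string in half
--     if d <= 1:
--         return n
--     h = d // 2
--     return _rev(n % (1 << h), h) * (1 << (d - h)) + _rev(n >> h, d - h)
-- ===== Notes on version B (the rewrite author's own statement) =====
-- stated objective: alternative
-- what changed: Replaces A's per-level simulation of the descent (depth-1 iterations of parity-branching ceil/floor halving) by a closed form: the leaf is 2**(depth-1) plus the bit-reversal of the low depth-1 bits of ith_ball-1, with the reversal computed by a divide-and-conquer recursion that splits the bit-string in half.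
import Mathlib
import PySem

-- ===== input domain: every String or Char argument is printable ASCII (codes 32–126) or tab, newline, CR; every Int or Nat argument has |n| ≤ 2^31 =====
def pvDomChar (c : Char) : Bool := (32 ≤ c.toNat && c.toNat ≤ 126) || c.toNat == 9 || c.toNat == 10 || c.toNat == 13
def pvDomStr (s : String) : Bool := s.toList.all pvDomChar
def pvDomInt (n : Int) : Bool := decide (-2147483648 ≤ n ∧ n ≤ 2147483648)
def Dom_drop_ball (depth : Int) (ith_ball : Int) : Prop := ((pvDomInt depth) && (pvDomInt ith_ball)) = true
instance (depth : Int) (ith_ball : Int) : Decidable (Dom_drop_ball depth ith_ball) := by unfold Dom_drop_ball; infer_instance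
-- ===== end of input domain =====

-- B replaces A's step-by-step descent by a closed form: 2^(depth-1) plus the divide-and-conquer
-- bit-reversal of the low depth-1 bits of ith_ball - 1 (objective: alternative).

-- ===== PORT A =====
-- loop body of A: branch on parity of ith_ball, ceil/floor-halve it, extend result
def dropAGo : Nat → Int → Int → Int
  | 0, _, result => result
  | k+1, ith, result =>
    if PySem.Int.mod ith 2 = 0 then dropAGo k (PySem.Int.floordiv ith 2) (result * 2 + 1)
    else dropAGo k (PySem.Int.floordiv (ith + 1) 2) (result * 2)

def drop_ball (depth : Int) (ith_ball : Int) : Int :=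
  dropAGo (depth - 1).toNat ith_ball 1   -- range(depth - 1) runs (depth-1).toNat times

-- ===== PORT B =====
-- _rev(n, d): reverse the d low bits of n by splitting the bit-string in half;
-- only ever called with d ≥ 1, so taking d : Nat is exact ('1 <<< h' = 1 << h, '>>>' = Python '>>')
def revB (d : Nat) (n : Int) : Int :=
  if d ≤ 1 then n
  else
    revB (d / 2) (PySem.Int.mod n ((1 : Int) <<< (d / 2))) * ((1 : Int) <<< (d - d / 2))
      + revB (d - d / 2) (n >>> (d / 2))
termination_by d
decreasing_by all_goals { simp at *; omega }

def drop_ball_alt (depth : Int) (ith_ball : Int) : Int :=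
  let d := depth - 1
  if d ≤ 0 then 1
  else
    let n := PySem.Int.mod (ith_ball - 1) ((1 : Int) <<< d.toNat)
    (1 : Int) <<< d.toNat + revB d.toNat n

-- ===== PRECONDITION & SPEC =====
def Spec_drop_ball (depth : Int) (ith_ball : Int) (out : Int) : Prop := out = drop_ball_alt depth ith_ball
instance (depth : Int) (ith_ball : Int) (out : Int) : Decidable (Spec_drop_ball depth ith_ball out) := by unfold Spec_drop_ball; infer_instance

-- ===== CLAIM (what is proved, stated in full; the proofs are below) =====
def Claim_equal_drop_ball : Prop := ∀ (depth : Int) (ith_ball : Int), Dom_drop_ball depth ith_ball → Spec_drop_ball depth ith_ball (drop_ball depth ith_ball)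

-- ===== LEMMAS AND PROOFS =====

-- linear bit-reversal: reference semantics connecting the two ports
def linRev : Nat → Int → Int
  | 0, _ => 0
  | k+1, n => (n % 2) * 2 ^ k + linRev k (n / 2)

lemma one_shiftLeft_int (k : Nat) : ((1 : Int) <<< k) = 2 ^ k := by
  simp [Int.shiftLeft_eq]

-- A's loop computes r * 2^k + linRev k (ith - 1)
lemma dropAGo_eq (k : Nat) : ∀ (ith r : Int), dropAGo k ith r = r * 2 ^ k + linRev k (ith - 1) := by
  induction k with
  | zero => intro ith r; simp [dropAGo, linRev]
  | succ k ih =>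
    intro ith r
    have h2 : PySem.Int.mod ith 2 = ith % 2 := PySem.Int.mod_eq_emod_of_pos (by omega)
    simp only [dropAGo, linRev, h2]
    by_cases h : ith % 2 = 0
    · have hfd : PySem.Int.floordiv ith 2 = Int.ediv ith 2 :=
        PySem.Int.floordiv_eq_ediv_of_pos (by omega)
      have hm : (ith - 1) % 2 = 1 := by omega
      have hd : ith.ediv 2 - 1 = (ith - 1) / 2 := by
        have : ith.ediv 2 = ith / 2 := rfl
        omega
      rw [if_pos h, ih, hfd, hm, hd, pow_succ]; ring
    · have hfd : PySem.Int.floordiv (ith + 1) 2 = Int.ediv (ith + 1) 2 :=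
        PySem.Int.floordiv_eq_ediv_of_pos (by omega)
      have hm : (ith - 1) % 2 = 0 := by omega
      have hd : (ith + 1).ediv 2 - 1 = (ith - 1) / 2 := by
        have : (ith + 1).ediv 2 = (ith + 1) / 2 := rfl
        omega
      rw [if_neg h, ih, hfd, hm, hd, pow_succ]; ring

-- linRev only depends on the low k bits
lemma linRev_split (b a : Nat) (n : Int) :
    linRev (a + b) n = linRev b (n % 2 ^ b) * 2 ^ a + linRev a (n / 2 ^ b) := by
  induction b generalizing n with
  | zero => simp [linRev]
  | succ b ih =>
    have e1 : n % 2 ^ (b + 1) % 2 = n % 2 := Int.emod_emod_of_dvd n ⟨2 ^ b, by ring⟩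
    have e3 : n / 2 ^ (b + 1) = n / 2 / 2 ^ b := by
      rw [Int.ediv_ediv_of_nonneg (by omega), pow_succ, mul_comm]
    have e2 : n % 2 ^ (b + 1) / 2 = n / 2 % 2 ^ b := by
      have hm : n % 2 ^ (b + 1) = n - 2 ^ (b + 1) * (n / 2 ^ (b + 1)) := Int.emod_def n _
      have hm2 : n / 2 % 2 ^ b = n / 2 - 2 ^ b * (n / 2 / 2 ^ b) := Int.emod_def _ _
      rw [hm, e3]
      have : n - 2 ^ (b + 1) * (n / 2 / 2 ^ b) = n + 2 * -(2 ^ b * (n / 2 / 2 ^ b)) := by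
        rw [pow_succ]; ring
      rw [this, Int.add_mul_ediv_left n _ (by omega : (2:Int) ≠ 0), hm2]; ring
    have : a + (b + 1) = (a + b) + 1 := by omega
    rw [this]
    simp only [linRev, ih (n / 2), e1, e2, e3]
    rw [pow_add]; ring

lemma linRev_mod (k : Nat) (n : Int) : linRev k (n % 2 ^ k) = linRev k n := by
  have h := linRev_split k 0 n
  simp [linRev] at h
  omega

-- B's divide-and-conquer reversal agrees with linRev on in-range inputs
lemma revB_eq (d : Nat) (n : Int) (hd : 1 ≤ d) (h0 : 0 ≤ n) (h1 : n < 2 ^ d) :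
    revB d n = linRev d n := by
  induction d using Nat.strong_induction_on generalizing n with
  | _ d ih =>
    rw [revB]
    by_cases h : d ≤ 1
    · have hd1 : d = 1 := by omega
      subst hd1
      have : n = n % 2 := by omega
      simp [linRev]
      omega
    · rw [if_neg h]
      have hp : (0:Int) < 2 ^ (d / 2) := by positivity
      have hmod : PySem.Int.mod n ((1 : Int) <<< (d / 2)) = n % 2 ^ (d / 2) := by
        rw [one_shiftLeft_int]; exact PySem.Int.mod_eq_emod_of_pos hp
      rw [hmod, one_shiftLeft_int, Int.shiftRight_eq_div_pow]
      push_cast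
      have hlt : n % 2 ^ (d / 2) < 2 ^ (d / 2) := Int.emod_lt_of_pos n hp
      have hge : 0 ≤ n % 2 ^ (d / 2) := Int.emod_nonneg n (by omega)
      have hq0 : 0 ≤ n / 2 ^ (d / 2) := Int.ediv_nonneg h0 (le_of_lt hp)
      have hq1 : n / 2 ^ (d / 2) < 2 ^ (d - d / 2) := by
        rw [Int.ediv_lt_iff_lt_mul hp]
        calc n < 2 ^ d := h1
        _ = 2 ^ (d - d / 2) * 2 ^ (d / 2) := by rw [← pow_add]; congr 1; omega
      rw [ih (d / 2) (by omega) _ (by omega) hge hlt,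
          ih (d - d / 2) (by omega) _ (by omega) hq0 hq1]
      have := linRev_split (d / 2) (d - d / 2) n
      rw [show d - d / 2 + d / 2 = d by omega] at this
      omega

-- ===== VERDICT (by name: the statement is the Claim_ definition above) =====
theorem drop_ball_spec : Claim_equal_drop_ball := by
  intro depth ith _
  unfold Spec_drop_ball drop_ball drop_ball_alt
  by_cases h : depth - 1 ≤ 0
  · rw [if_pos h]
    have : (depth - 1).toNat = 0 := by omega
    rw [this]; rfl
  · rw [if_neg h]
    set k := (depth - 1).toNat with hk
    have hk1 : 1 ≤ k := by omega
    have hp : (0:Int) < 2 ^ k := by positivity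
    have hmod : PySem.Int.mod (ith - 1) ((1 : Int) <<< k) = (ith - 1) % 2 ^ k := by
      rw [one_shiftLeft_int]; exact PySem.Int.mod_eq_emod_of_pos hp
    rw [dropAGo_eq]
    show 1 * 2 ^ k + linRev k (ith - 1)
        = (1 : Int) <<< k + revB k (PySem.Int.mod (ith - 1) ((1 : Int) <<< k))
    rw [hmod, one_shiftLeft_int,
        revB_eq k _ hk1 (Int.emod_nonneg _ (by omega)) (Int.emod_lt_of_pos _ hp),
        linRev_mod]
    ring
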